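-- pv_equiv track=rewrite | github.com/guptabhaskar/TwoPassAssembler | Assembler.py | no_of_opcodes
-- ===== SOURCE A (Python) =====
-- def no_of_opcodes(line,opcode):
-- 	l=line.split()
-- 	count=0
-- 	opcodekeyslist=opcode.keys()
-- 	for i in l:
-- 		if(i in opcodekeyslist):
-- 			count+=1
-- 	return count
-- ===== SOURCE B (Python) =====
-- def no_of_opcodes(line, opcode):
--     tokens = line.split()
--     return sum(tokens.count(k) for k in opcode)
-- ===== Notes on version B (the rewrite author's own statement) =====
-- stated objective: alternative
-- what changed: B inverts the traversal: instead of one pass over the line's tokens testing membership in the opcode keys, it splits the line once and sums tokens.count(k) over the opcode keys, which equals A's count because dict keys are unique.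
import Mathlib
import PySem

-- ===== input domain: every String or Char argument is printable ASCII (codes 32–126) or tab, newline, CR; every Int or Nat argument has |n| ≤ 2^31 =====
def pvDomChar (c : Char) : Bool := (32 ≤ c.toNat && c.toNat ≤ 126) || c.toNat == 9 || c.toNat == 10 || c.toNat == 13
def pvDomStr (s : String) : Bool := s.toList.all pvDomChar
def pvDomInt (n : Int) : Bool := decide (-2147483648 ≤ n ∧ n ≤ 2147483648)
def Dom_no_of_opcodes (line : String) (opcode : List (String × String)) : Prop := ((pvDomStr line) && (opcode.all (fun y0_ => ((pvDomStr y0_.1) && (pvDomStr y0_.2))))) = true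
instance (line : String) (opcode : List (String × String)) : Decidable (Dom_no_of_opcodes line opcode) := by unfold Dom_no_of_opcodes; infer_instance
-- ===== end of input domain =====

-- B reverses the traversal: it splits the line once and sums tokens.count(k) over the opcode keys,
-- instead of A's single membership pass over the tokens; equal because dict keys are unique.

-- ===== PORT A =====
def no_of_opcodes (line : String) (opcode : List (String × String)) : Int :=
  let l := PySem.Str.split₀ line
  let opcodekeyslist := opcode.map Prod.fst
  l.foldl (fun count i => if opcodekeyslist.contains i then count + 1 else count) 0

-- ===== PORT B =====
def no_of_opcodes_alt (line : String) (opcode : List (String × String)) : Int :=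
  let tokens := PySem.Str.split₀ line
  (opcode.map Prod.fst).foldl (fun acc k => acc + (tokens.count k : Int)) 0

-- ===== PRECONDITION & SPEC =====
-- Pre_ only requires the association list to have distinct keys, as every list arising from a
-- Python dict does; it excludes no input a Python caller can produce.
def Pre_no_of_opcodes (line : String) (opcode : List (String × String)) : Prop :=
  (opcode.map Prod.fst).Nodup
instance (line : String) (opcode : List (String × String)) : Decidable (Pre_no_of_opcodes line opcode) := by unfold Pre_no_of_opcodes; infer_instance

def pvWitness_no_of_opcodes : String × (List (String × String)) :=
  ("ADD X ADD", [("ADD", "1"), ("SUB", "2")])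

def Spec_no_of_opcodes (line : String) (opcode : List (String × String)) (out : Int) : Prop := out = no_of_opcodes_alt line opcode
instance (line : String) (opcode : List (String × String)) (out : Int) : Decidable (Spec_no_of_opcodes line opcode out) := by unfold Spec_no_of_opcodes; infer_instance

-- ===== CLAIM (what is proved, stated in full; the proofs are below) =====
def Claim_equal_no_of_opcodes : Prop := ∀ (line : String) (opcode : List (String × String)), Dom_no_of_opcodes line opcode → Pre_no_of_opcodes line opcode → Spec_no_of_opcodes line opcode (no_of_opcodes line opcode)

-- ===== LEMMAS AND PROOFS =====

-- Summing 'if t = k then 1 else 0' over a list not containing t gives 0.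
theorem pv_sum_ite_not_mem (t : String) (ks : List String) (h : t ∉ ks) :
    (ks.map (fun k => if t = k then (1 : Int) else 0)).sum = 0 := by
  induction ks with
  | nil => simp
  | cons k ks ih =>
    simp only [List.mem_cons, not_or] at h
    simp [h.1, ih h.2]

-- Over a duplicate-free key list, that 0/1 sum is the membership indicator.
theorem pv_sum_ite_nodup (t : String) (ks : List String) (h : ks.Nodup) :
    (ks.map (fun k => if t = k then (1 : Int) else 0)).sum
      = if t ∈ ks then 1 else 0 := by
  induction ks with
  | nil => simp
  | cons k ks ih =>
    rcases List.nodup_cons.mp h with ⟨hk, hks⟩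
    by_cases ht : t = k
    · subst ht
      simp [pv_sum_ite_not_mem t ks hk]
    · simp [ht, ih hks]

-- Key identity: per-key occurrence counts sum to the number of tokens among the keys.
theorem pv_sum_count_eq_countP (ts ks : List String) (h : ks.Nodup) :
    (ks.map (fun k => (ts.count k : Int))).sum
      = (ts.countP (fun i => ks.contains i) : Int) := by
  induction ts with
  | nil => simp
  | cons t ts ih =>
    have hmap : ks.map (fun k => ((t :: ts).count k : Int))
        = ks.map (fun k => (ts.count k : Int) + (if t = k then (1 : Int) else 0)) := by
      apply List.map_congr_left
      intro k _
      rw [List.count_cons]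
      by_cases ht : t = k <;> simp [ht]
    rw [hmap, PySem.List.sum_map_add_int, ih, pv_sum_ite_nodup t ks h]
    by_cases ht : t ∈ ks <;> simp [ht]

-- ===== VERDICT (by name: the statement is the Claim_ definition above) =====
theorem no_of_opcodes_spec : Claim_equal_no_of_opcodes := by
  intro line opcode _ hpre
  unfold Spec_no_of_opcodes no_of_opcodes no_of_opcodes_alt
  rw [PySem.List.foldl_if_add_one, PySem.List.foldl_add, zero_add, zero_add,
    pv_sum_count_eq_countP _ _ hpre]
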